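-- pv_equiv track=rewrite | github.com/teruuj1/algoths | vaccine/main.py | solve_vaccine
-- ===== SOURCE A (Python) =====
-- def solve_vaccine(n, tA, tB, transfer_A_to_B, transfer_B_to_A):
--     # dpA[i] — мин. время, чтобы закончить этап i в лаборатории A
--     # dpB[i] — мин. время, чтобы закончить этап i в лаборатории B
--     dpA = [0] * n
--     dpB = [0] * n
--
--     # prevA[i] — откуда пришли в A на этапе i (0=A, 1=B)
--     # prevB[i] — откуда пришли в B на этапе i (0=A, 1=B)
--     prevA = [-1] * n
--     prevB = [-1] * n
--
--     # Базовый случай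
--     dpA[0] = tA[0]
--     dpB[0] = tB[0]
--
--     # Заполняем DP
--     for i in range(1, n):
--         # Из A в A
--         cost_A_to_A = dpA[i-1] + tA[i]
--         # Из B в A
--         cost_B_to_A = dpB[i-1] + transfer_B_to_A[i-1] + tA[i]
--
--         if cost_A_to_A <= cost_B_to_A:
--             dpA[i] = cost_A_to_A
--             prevA[i] = 0  # пришли из A
--         else:
--             dpA[i] = cost_B_to_A
--             prevA[i] = 1  # пришли из B
--
--         # Из B в B
--         cost_B_to_B = dpB[i-1] + tB[i]
--         # Из A в B
--         cost_A_to_B = dpA[i-1] + transfer_A_to_B[i-1] + tB[i]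
--
--         if cost_B_to_B <= cost_A_to_B:
--             dpB[i] = cost_B_to_B
--             prevB[i] = 1  # пришли из B
--         else:
--             dpB[i] = cost_A_to_B
--             prevB[i] = 0  # пришли из A
--
--     # Определяем минимальное время и конечную лабораторию
--     if dpA[n-1] <= dpB[n-1]:
--         min_time = dpA[n-1]
--         current_lab = 'A'
--     else:
--         min_time = dpB[n-1]
--         current_lab = 'B'
--
--     # Восстанавливаем траекторию
--     trajectory = [''] * n
--     trajectory[n-1] = current_lab
--
--     for i in range(n-1, 0, -1):
--         if current_lab == 'A':
--             from_where = prevA[i]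
--             if from_where == 0:
--                 current_lab = 'A'
--             else:
--                 current_lab = 'B'
--         else:  # current_lab == 'B'
--             from_where = prevB[i]
--             if from_where == 0:
--                 current_lab = 'A'
--             else:
--                 current_lab = 'B'
--         trajectory[i-1] = current_lab
--
--     return min_time, trajectory
-- ===== SOURCE B (Python) =====
-- def solve_vaccine(n, tA, tB, transfer_A_to_B, transfer_B_to_A):
--     # Single forward pass that carries the two candidate trajectories along
--     # with their costs: no prev tables and no backward reconstruction pass.
--     costA, costB = tA[0], tB[0]
--     trajA, trajB = ['A'], ['B']
--     for i in range(1, n):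
--         cAA = costA + tA[i]
--         cBA = costB + transfer_B_to_A[i-1] + tA[i]
--         cBB = costB + tB[i]
--         cAB = costA + transfer_A_to_B[i-1] + tB[i]
--         if cAA <= cBA:
--             newA, newTrajA = cAA, trajA + ['A']
--         else:
--             newA, newTrajA = cBA, trajB + ['A']
--         if cBB <= cAB:
--             newB, newTrajB = cBB, trajB + ['B']
--         else:
--             newB, newTrajB = cAB, trajA + ['B']
--         costA, costB, trajA, trajB = newA, newB, newTrajA, newTrajB
--     if costA <= costB:
--         return costA, trajA
--     return costB, trajB
-- ===== Notes on version B (the rewrite author's own statement) =====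
-- stated objective: alternative
-- what changed: B replaces the store-decisions-then-backtrack scheme by a single forward pass that carries, for each lab, the full optimal trajectory ending there together with its cost; there are no prev tables and no backward reconstruction loop (it trades the backward pass for copying candidate trajectories forward).
import Mathlib
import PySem

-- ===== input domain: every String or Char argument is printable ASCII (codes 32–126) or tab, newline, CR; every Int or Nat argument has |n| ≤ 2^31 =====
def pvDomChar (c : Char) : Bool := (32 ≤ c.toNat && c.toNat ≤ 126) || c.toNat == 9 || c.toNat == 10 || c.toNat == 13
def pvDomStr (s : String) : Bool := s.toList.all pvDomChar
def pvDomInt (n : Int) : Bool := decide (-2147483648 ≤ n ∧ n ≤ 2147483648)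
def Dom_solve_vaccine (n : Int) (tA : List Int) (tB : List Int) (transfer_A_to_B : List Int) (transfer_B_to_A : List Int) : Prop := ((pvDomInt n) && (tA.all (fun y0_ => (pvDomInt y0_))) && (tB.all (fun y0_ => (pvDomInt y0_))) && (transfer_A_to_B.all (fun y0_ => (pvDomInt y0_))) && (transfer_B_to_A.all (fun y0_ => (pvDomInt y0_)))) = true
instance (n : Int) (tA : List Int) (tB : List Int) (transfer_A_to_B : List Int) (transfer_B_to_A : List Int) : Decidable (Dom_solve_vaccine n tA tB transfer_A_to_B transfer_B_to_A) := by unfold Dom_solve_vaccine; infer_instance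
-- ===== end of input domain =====

-- B replaces A's store-decisions-then-backtrack scheme by a single forward pass carrying,
-- for each lab, the optimal trajectory ending there together with its cost (no prev
-- tables, no backward loop); objective: alternative (same result, copies trajectories).

-- ===== PORT A =====
-- one forward DP step of A (fills dpA[i], dpB[i], prevA[i], prevB[i])
def stepA_fwd (tA tB ab ba : List Int)
    (s : List Int × List Int × List Int × List Int) (i : Int) :
    List Int × List Int × List Int × List Int :=
  let cAA := PySem.List.pyGetD s.1 (i-1) 0 + PySem.List.pyGetD tA i 0
  let cBA := PySem.List.pyGetD s.2.1 (i-1) 0 + PySem.List.pyGetD ba (i-1) 0 + PySem.List.pyGetD tA i 0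
  let dpA' := if cAA ≤ cBA then PySem.List.pySetD s.1 i cAA else PySem.List.pySetD s.1 i cBA
  let prevA' := if cAA ≤ cBA then PySem.List.pySetD s.2.2.1 i 0 else PySem.List.pySetD s.2.2.1 i 1
  let cBB := PySem.List.pyGetD s.2.1 (i-1) 0 + PySem.List.pyGetD tB i 0
  let cAB := PySem.List.pyGetD dpA' (i-1) 0 + PySem.List.pyGetD ab (i-1) 0 + PySem.List.pyGetD tB i 0
  let dpB' := if cBB ≤ cAB then PySem.List.pySetD s.2.1 i cBB else PySem.List.pySetD s.2.1 i cAB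
  let prevB' := if cBB ≤ cAB then PySem.List.pySetD s.2.2.2 i 1 else PySem.List.pySetD s.2.2.2 i 0
  (dpA', dpB', prevA', prevB')

-- one backward reconstruction step of A (reads prevA[i]/prevB[i], writes trajectory[i-1])
def stepA_bwd (prevA prevB : List Int) (s : String × List String) (i : Int) :
    String × List String :=
  let lab := if s.1 = "A"
    then (if PySem.List.pyGetD prevA i 0 = 0 then "A" else "B")
    else (if PySem.List.pyGetD prevB i 0 = 0 then "A" else "B")
  (lab, PySem.List.pySetD s.2 (i-1) lab)

def solve_vaccine (n : Int) (tA : List Int) (tB : List Int) (transfer_A_to_B : List Int) (transfer_B_to_A : List Int) : Int × List String :=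
  let nn := n.toNat
  let dpA := PySem.List.pySetD (List.replicate nn (0:Int)) 0 (PySem.List.pyGetD tA 0 0)
  let dpB := PySem.List.pySetD (List.replicate nn (0:Int)) 0 (PySem.List.pyGetD tB 0 0)
  let prevA := List.replicate nn (-1 : Int)
  let prevB := List.replicate nn (-1 : Int)
  let st := (PySem.List.pyRange 1 n 1).foldl (stepA_fwd tA tB transfer_A_to_B transfer_B_to_A) (dpA, dpB, prevA, prevB)
  let mt := if PySem.List.pyGetD st.1 (n-1) 0 ≤ PySem.List.pyGetD st.2.1 (n-1) 0
    then (PySem.List.pyGetD st.1 (n-1) 0, "A")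
    else (PySem.List.pyGetD st.2.1 (n-1) 0, "B")
  let traj0 := PySem.List.pySetD (List.replicate nn "") (n-1) mt.2
  let fin := (PySem.List.pyRange (n-1) 0 (-1)).foldl (stepA_bwd st.2.2.1 st.2.2.2) (mt.2, traj0)
  (mt.1, fin.2)

-- ===== PORT B =====
-- one step of B: update both costs and both candidate trajectories simultaneously
def stepB (tA tB ab ba : List Int)
    (s : Int × Int × List String × List String) (i : Int) :
    Int × Int × List String × List String :=
  let cAA := s.1 + PySem.List.pyGetD tA i 0
  let cBA := s.2.1 + PySem.List.pyGetD ba (i-1) 0 + PySem.List.pyGetD tA i 0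
  let cBB := s.2.1 + PySem.List.pyGetD tB i 0
  let cAB := s.1 + PySem.List.pyGetD ab (i-1) 0 + PySem.List.pyGetD tB i 0
  let nA := if cAA ≤ cBA then (cAA, s.2.2.1 ++ ["A"]) else (cBA, s.2.2.2 ++ ["A"])
  let nB := if cBB ≤ cAB then (cBB, s.2.2.2 ++ ["B"]) else (cAB, s.2.2.1 ++ ["B"])
  (nA.1, nB.1, nA.2, nB.2)

def solve_vaccine_alt (n : Int) (tA : List Int) (tB : List Int) (transfer_A_to_B : List Int) (transfer_B_to_A : List Int) : Int × List String :=
  let st := (PySem.List.pyRange 1 n 1).foldl (stepB tA tB transfer_A_to_B transfer_B_to_A)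
    (PySem.List.pyGetD tA 0 0, PySem.List.pyGetD tB 0 0, ["A"], ["B"])
  if st.1 ≤ st.2.1 then (st.1, st.2.2.1) else (st.2.1, st.2.2.2)

-- ===== PRECONDITION & SPEC =====
-- Pre_ excludes exactly the inputs on which Python A raises IndexError:
-- n < 1, or a stage list shorter than n, or a transfer list shorter than n-1.
def Pre_solve_vaccine (n : Int) (tA : List Int) (tB : List Int) (transfer_A_to_B : List Int) (transfer_B_to_A : List Int) : Prop :=
  1 ≤ n ∧ n ≤ (tA.length : Int) ∧ n ≤ (tB.length : Int) ∧
  n - 1 ≤ (transfer_A_to_B.length : Int) ∧ n - 1 ≤ (transfer_B_to_A.length : Int)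
instance (n : Int) (tA : List Int) (tB : List Int) (transfer_A_to_B : List Int) (transfer_B_to_A : List Int) : Decidable (Pre_solve_vaccine n tA tB transfer_A_to_B transfer_B_to_A) := by unfold Pre_solve_vaccine; infer_instance

def pvWitness_solve_vaccine : Int × List Int × List Int × List Int × List Int :=
  (3, [2, 1, 4], [3, 1, 1], [1, 2], [2, 1])

def Spec_solve_vaccine (n : Int) (tA : List Int) (tB : List Int) (transfer_A_to_B : List Int) (transfer_B_to_A : List Int) (out : Int × List String) : Prop := out = solve_vaccine_alt n tA tB transfer_A_to_B transfer_B_to_A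
instance (n : Int) (tA : List Int) (tB : List Int) (transfer_A_to_B : List Int) (transfer_B_to_A : List Int) (out : Int × List String) : Decidable (Spec_solve_vaccine n tA tB transfer_A_to_B transfer_B_to_A out) := by unfold Spec_solve_vaccine; infer_instance

-- ===== CLAIM (what is proved, stated in full; the proofs are below) =====
def Claim_equal_solve_vaccine : Prop := ∀ (n : Int) (tA : List Int) (tB : List Int) (transfer_A_to_B : List Int) (transfer_B_to_A : List Int), Dom_solve_vaccine n tA tB transfer_A_to_B transfer_B_to_A → Pre_solve_vaccine n tA tB transfer_A_to_B transfer_B_to_A → Spec_solve_vaccine n tA tB transfer_A_to_B transfer_B_to_A (solve_vaccine n tA tB transfer_A_to_B transfer_B_to_A)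

-- ===== LEMMAS AND PROOFS =====

-- reference DP values: fDP j = (dpA[j], dpB[j])
def fDP (tA tB ab ba : List Int) : Nat → Int × Int
  | 0 => (tA.getD 0 0, tB.getD 0 0)
  | j+1 =>
    let p := fDP tA tB ab ba j
    (min (p.1 + tA.getD (j+1) 0) (p.2 + ba.getD j 0 + tA.getD (j+1) 0),
     min (p.2 + tB.getD (j+1) 0) (p.1 + ab.getD j 0 + tB.getD (j+1) 0))

-- reference backward chain: lab at stage (top - k), starting from lab0 at stage top
def Lfrom (tA tB ab ba : List Int) (top : Nat) (lab0 : String) : Nat → String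
  | 0 => lab0
  | k+1 =>
    let j := top - k - 1
    if Lfrom tA tB ab ba top lab0 k = "A"
    then (if (fDP tA tB ab ba j).1 ≤ (fDP tA tB ab ba j).2 + ba.getD j 0 then "A" else "B")
    else (if (fDP tA tB ab ba j).2 ≤ (fDP tA tB ab ba j).1 + ab.getD j 0 then "B" else "A")

-- reference trajectories carried forward by B: (traj ending in A, traj ending in B)
def fTraj (tA tB ab ba : List Int) : Nat → List String × List String
  | 0 => (["A"], ["B"])
  | j+1 =>
    let p := fTraj tA tB ab ba j
    let f := fDP tA tB ab ba j
    ((if f.1 ≤ f.2 + ba.getD j 0 then p.1 else p.2) ++ ["A"],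
     (if f.2 ≤ f.1 + ab.getD j 0 then p.2 else p.1) ++ ["B"])

-- generic helpers
theorem getD_set_self {α : Type} (xs : List α) (n : Nat) (v d : α) (h : n < xs.length) :
    (xs.set n v).getD n d = v := by
  simp [List.getD_eq_getElem?_getD, h]

theorem getD_set_ne {α : Type} (xs : List α) (n m : Nat) (v d : α) (h : n ≠ m) :
    (xs.set n v).getD m d = xs.getD m d := by
  simp [List.getD_eq_getElem?_getD, List.getElem?_set_ne, h]

theorem list_eq_map_range {α : Type} (xs : List α) (nn : Nat) (d : α) (g : Nat → α)
    (h1 : xs.length = nn) (h2 : ∀ j, j < nn → xs.getD j d = g j) :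
    xs = (List.range nn).map g := by
  apply List.ext_getElem (by simp [h1])
  intro i hi1 hi2
  have h := h2 i (by omega)
  rw [List.getD_eq_getElem?_getD, List.getElem?_eq_getElem hi1] at h
  simpa using h

-- shifting the top of the backward chain by one
theorem Lfrom_shift (tA tB ab ba : List Int) (j : Nat) (lab : String) (k : Nat) :
    Lfrom tA tB ab ba (j+1) lab (k+1) = Lfrom tA tB ab ba j (Lfrom tA tB ab ba (j+1) lab 1) k := by
  induction k with
  | zero => rfl
  | succ k ih =>
    conv_lhs => rw [Lfrom]
    conv_rhs => rw [Lfrom]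
    rw [← ih]
    simp only [show j + 1 - (k+1) - 1 = j - k - 1 from by omega]

-- the forward trajectories are the backward chains, read front-to-back
theorem fTraj_eq (tA tB ab ba : List Int) (j : Nat) :
    (fTraj tA tB ab ba j).1 = (List.range (j+1)).map (fun i => Lfrom tA tB ab ba j "A" (j - i)) ∧
    (fTraj tA tB ab ba j).2 = (List.range (j+1)).map (fun i => Lfrom tA tB ab ba j "B" (j - i)) := by
  induction j with
  | zero => constructor <;> rfl
  | succ j ih =>
    have hstep : ∀ lab : String,
        (List.range (j+2)).map (fun i => Lfrom tA tB ab ba (j+1) lab (j+1-i)) =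
        ((List.range (j+1)).map (fun i => Lfrom tA tB ab ba j (Lfrom tA tB ab ba (j+1) lab 1) (j-i))) ++ [lab] := by
      intro lab
      rw [List.range_succ, List.map_append]
      congr 1
      · refine List.map_congr_left fun i hi => ?_
        rw [List.mem_range] at hi
        rw [show j + 1 - i = (j - i) + 1 from by omega, Lfrom_shift]
      · simp [Lfrom]
    constructor
    · show (if (fDP tA tB ab ba j).1 ≤ (fDP tA tB ab ba j).2 + ba.getD j 0
          then (fTraj tA tB ab ba j).1 else (fTraj tA tB ab ba j).2) ++ ["A"] = _
      rw [hstep "A"]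
      have h1 : Lfrom tA tB ab ba (j+1) "A" 1 =
          (if (fDP tA tB ab ba j).1 ≤ (fDP tA tB ab ba j).2 + ba.getD j 0 then "A" else "B") := by
        simp [Lfrom]
      rw [h1]
      split_ifs with hc
      · rw [ih.1]
      · rw [ih.2]
    · show (if (fDP tA tB ab ba j).2 ≤ (fDP tA tB ab ba j).1 + ab.getD j 0
          then (fTraj tA tB ab ba j).2 else (fTraj tA tB ab ba j).1) ++ ["B"] = _
      rw [hstep "B"]
      have h1 : Lfrom tA tB ab ba (j+1) "B" 1 =
          (if (fDP tA tB ab ba j).2 ≤ (fDP tA tB ab ba j).1 + ab.getD j 0 then "B" else "A") := by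
        simp [Lfrom]
      rw [h1]
      split_ifs with hc
      · rw [ih.2]
      · rw [ih.1]

-- forward invariant of A's DP fold
theorem fwdA (tA tB ab ba : List Int) (nn m : Nat) :
    m < nn → ∀ st, st = (PySem.List.pyRange 1 ((m:Int)+1) 1).foldl (stepA_fwd tA tB ab ba)
      (PySem.List.pySetD (List.replicate nn (0:Int)) 0 (PySem.List.pyGetD tA 0 0),
       PySem.List.pySetD (List.replicate nn (0:Int)) 0 (PySem.List.pyGetD tB 0 0),
       List.replicate nn (-1 : Int), List.replicate nn (-1 : Int)) →
    st.1.length = nn ∧ st.2.1.length = nn ∧ st.2.2.1.length = nn ∧ st.2.2.2.length = nn ∧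
    (∀ j : Nat, j ≤ m → st.1.getD j 0 = (fDP tA tB ab ba j).1 ∧ st.2.1.getD j 0 = (fDP tA tB ab ba j).2) ∧
    (∀ j : Nat, j < m →
      st.2.2.1.getD (j+1) 0 = (if (fDP tA tB ab ba j).1 ≤ (fDP tA tB ab ba j).2 + ba.getD j 0 then 0 else 1) ∧
      st.2.2.2.getD (j+1) 0 = (if (fDP tA tB ab ba j).2 ≤ (fDP tA tB ab ba j).1 + ab.getD j 0 then 1 else 0)) := by
  induction m with
  | zero =>
    intro hm st hst
    rw [show ((0:Nat):Int)+1 = 1 by norm_num, PySem.List.pyRange_one_eq_nil (by norm_num)] at hst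
    simp only [List.foldl_nil] at hst
    subst hst
    have hset : ∀ (xs : List Int) (v : Int), PySem.List.pySetD xs 0 v = xs.set 0 v :=
      fun xs v => PySem.List.pySetD_of_nonneg xs v (by norm_num)
    simp only [hset]
    refine ⟨by simp, by simp, by simp, by simp, ?_, fun j hj => absurd hj (by omega)⟩
    intro j hj
    have hj0 : j = 0 := by omega
    subst hj0
    constructor <;> rw [getD_set_self _ _ _ _ (by simp; omega)] <;>
      simp [fDP, PySem.List.pyGetD_zero]
  | succ m ih =>
    intro hm st hst
    obtain ⟨l1, l2, l3, l4, hv, hp⟩ := ih (by omega) _ rfl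
    rw [show (((m+1:Nat)):Int)+1 = ((m:Int)+1)+1 by push_cast; ring,
        PySem.List.pyRange_one_succ_right (by omega), List.foldl_append] at hst
    simp only [List.foldl_cons, List.foldl_nil] at hst
    simp only [stepA_fwd] at hst
    rw [show ((m:Int)+1)-1 = ((m:Nat):Int) by ring] at hst
    have hgA : PySem.List.pyGetD tA ((m:Int)+1) 0 = tA.getD (m+1) 0 := by
      rw [show ((m:Int)+1) = (((m+1:Nat)):Int) by push_cast; ring, PySem.List.pyGetD_natCast]
    have hgB : PySem.List.pyGetD tB ((m:Int)+1) 0 = tB.getD (m+1) 0 := by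
      rw [show ((m:Int)+1) = (((m+1:Nat)):Int) by push_cast; ring, PySem.List.pyGetD_natCast]
    have hsetm : ∀ (xs : List Int) (v : Int), PySem.List.pySetD xs ((m:Int)+1) v = xs.set (m+1) v := by
      intro xs v
      rw [show ((m:Int)+1) = (((m+1:Nat)):Int) by push_cast; ring, PySem.List.pySetD_natCast]
    rw [hgA, hgB] at hst
    simp only [PySem.List.pyGetD_natCast] at hst
    simp only [hsetm] at hst
    rw [(hv m le_rfl).1, (hv m le_rfl).2] at hst
    set fm := fDP tA tB ab ba m with hfm
    by_cases h1 : fm.1 + tA.getD (m+1) 0 ≤ fm.2 + ba.getD m 0 + tA.getD (m+1) 0 <;>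
      [rw [if_pos h1, if_pos h1] at hst; rw [if_neg h1, if_neg h1] at hst] <;>
    (rw [getD_set_ne _ _ _ _ _ (by omega), (hv m le_rfl).1] at hst
     by_cases h2 : fm.2 + tB.getD (m+1) 0 ≤ fm.1 + ab.getD m 0 + tB.getD (m+1) 0 <;>
       [rw [if_pos h2, if_pos h2] at hst; rw [if_neg h2, if_neg h2] at hst] <;>
     (subst hst
      refine ⟨by simp [l1], by simp [l2], by simp [l3], by simp [l4], ?_, ?_⟩
      · intro j hj
        by_cases hj' : j = m + 1
        · subst hj'
          constructor <;> rw [getD_set_self _ _ _ _ (by omega)] <;>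
            (simp only [fDP, ← hfm, min_def]
             split_ifs <;> omega)
        · have hjm : j ≤ m := by omega
          constructor <;> rw [getD_set_ne _ _ _ _ _ (by omega)]
          · exact (hv j hjm).1
          · exact (hv j hjm).2
      · intro j hj
        by_cases hj' : j = m
        · subst hj'
          constructor <;> rw [getD_set_self _ _ _ _ (by omega)] <;>
            rw [← hfm] <;> (split_ifs <;> omega)
        · have hjm : j < m := by omega
          constructor <;> rw [getD_set_ne _ _ _ _ _ (by omega)]
          · exact (hp j hjm).1
          · exact (hp j hjm).2))

-- backward invariant of A's reconstruction fold (lab0 = the chosen final lab)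
theorem bwdA (tA tB ab ba : List Int) (nn last : Nat) (hnn : nn = last + 1) (lab0 : String)
    (prevA prevB : List Int)
    (hA : ∀ j : Nat, j < last →
      prevA.getD (j+1) 0 = (if (fDP tA tB ab ba j).1 ≤ (fDP tA tB ab ba j).2 + ba.getD j 0 then 0 else 1))
    (hB : ∀ j : Nat, j < last →
      prevB.getD (j+1) 0 = (if (fDP tA tB ab ba j).2 ≤ (fDP tA tB ab ba j).1 + ab.getD j 0 then 1 else 0)) :
    ∀ (a : Nat), a ≤ last → ∀ (traj : List String), traj.length = nn →
    (∀ j : Nat, a ≤ j → j ≤ last → traj.getD j "" = Lfrom tA tB ab ba last lab0 (last - j)) →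
    (((PySem.List.pyRange (a:Int) 0 (-1)).foldl (stepA_bwd prevA prevB)
        (Lfrom tA tB ab ba last lab0 (last - a), traj)).2.length = nn ∧
     ∀ j : Nat, j ≤ last →
      ((PySem.List.pyRange (a:Int) 0 (-1)).foldl (stepA_bwd prevA prevB)
        (Lfrom tA tB ab ba last lab0 (last - a), traj)).2.getD j "" = Lfrom tA tB ab ba last lab0 (last - j)) := by
  intro a
  induction a with
  | zero =>
    intro _ traj hlen htraj
    rw [show ((0:Nat):Int) = 0 from rfl, PySem.List.pyRange_neg_one_eq_nil (by norm_num)]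
    simp only [List.foldl_nil]
    exact ⟨hlen, fun j hj => htraj j (by omega) hj⟩
  | succ a ih =>
    intro ha traj hlen htraj
    rw [PySem.List.pyRange_neg_one_cons (by exact_mod_cast Nat.succ_pos a)]
    rw [show ((a+1:Nat):Int)-1 = ((a:Nat):Int) by push_cast; ring]
    simp only [List.foldl_cons]
    simp only [stepA_bwd]
    rw [show ((a+1:Nat):Int)-1 = ((a:Nat):Int) by push_cast; ring]
    simp only [PySem.List.pyGetD_natCast, PySem.List.pySetD_natCast]
    have hkey : (if Lfrom tA tB ab ba last lab0 (last-(a+1)) = "A"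
        then (if prevA.getD (a+1) 0 = 0 then "A" else "B")
        else (if prevB.getD (a+1) 0 = 0 then "A" else "B")) = Lfrom tA tB ab ba last lab0 (last - a) := by
      rw [show last - a = (last - (a+1)) + 1 by omega]
      conv_rhs => rw [Lfrom]
      rw [show last - (last - (a+1)) - 1 = a by omega]
      rw [hA a (by omega), hB a (by omega)]
      set Lk := Lfrom tA tB ab ba last lab0 (last - (a+1))
      split_ifs <;> simp_all
    rw [hkey]
    exact ih (by omega) (traj.set a (Lfrom tA tB ab ba last lab0 (last - a))) (by simp [hlen])
      (by
        intro j hja hjl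
        by_cases hj : j = a
        · subst hj
          rw [getD_set_self _ _ _ _ (by omega)]
        · rw [getD_set_ne _ _ _ _ _ (by omega)]
          exact htraj j (by omega) hjl)

-- forward invariant of B's single pass: costs and trajectories are the reference ones
theorem fwdB (tA tB ab ba : List Int) (m : Nat) :
    (PySem.List.pyRange 1 ((m:Int)+1) 1).foldl (stepB tA tB ab ba)
      (PySem.List.pyGetD tA 0 0, PySem.List.pyGetD tB 0 0, ["A"], ["B"])
    = ((fDP tA tB ab ba m).1, (fDP tA tB ab ba m).2,
       (fTraj tA tB ab ba m).1, (fTraj tA tB ab ba m).2) := by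
  induction m with
  | zero =>
    rw [show ((0:Nat):Int)+1 = 1 by norm_num, PySem.List.pyRange_one_eq_nil (by norm_num)]
    simp [fDP, fTraj, PySem.List.pyGetD_zero]
  | succ m ih =>
    rw [show (((m+1:Nat)):Int)+1 = ((m:Int)+1)+1 by push_cast; ring,
        PySem.List.pyRange_one_succ_right (by omega), List.foldl_append, ih]
    simp only [List.foldl_cons, List.foldl_nil]
    unfold stepB
    rw [show ((m:Int)+1)-1 = ((m:Nat):Int) by ring]
    have hgA : PySem.List.pyGetD tA ((m:Int)+1) 0 = tA.getD (m+1) 0 := by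
      rw [show ((m:Int)+1) = (((m+1:Nat)):Int) by push_cast; ring, PySem.List.pyGetD_natCast]
    have hgB : PySem.List.pyGetD tB ((m:Int)+1) 0 = tB.getD (m+1) 0 := by
      rw [show ((m:Int)+1) = (((m+1:Nat)):Int) by push_cast; ring, PySem.List.pyGetD_natCast]
    rw [hgA, hgB]
    simp only [PySem.List.pyGetD_natCast]
    set fm := fDP tA tB ab ba m with hfm
    by_cases h1 : fm.1 + tA.getD (m+1) 0 ≤ fm.2 + ba.getD m 0 + tA.getD (m+1) 0 <;>
      [rw [if_pos h1]; rw [if_neg h1]] <;>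
    (by_cases h2 : fm.2 + tB.getD (m+1) 0 ≤ fm.1 + ab.getD m 0 + tB.getD (m+1) 0 <;>
       [rw [if_pos h2]; rw [if_neg h2]] <;>
     (simp only [fDP, fTraj, ← hfm, min_def]
      refine Prod.ext ?_ (Prod.ext ?_ (Prod.ext ?_ ?_)) <;> simp only [] <;>
        (split_ifs <;> first | rfl | omega)))

theorem solve_vaccine_spec : Claim_equal_solve_vaccine := by
  intro n tA tB ab ba _ hpre
  obtain ⟨h1, h2, h3, h4, h5⟩ := hpre
  unfold Spec_solve_vaccine
  simp only [solve_vaccine, solve_vaccine_alt]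
  set nn := n.toNat with hnndef
  set last := nn - 1 with hlastdef
  have hn1 : 1 ≤ nn := by omega
  have hnlast : nn = last + 1 := by omega
  rw [show n = ((last:Nat):Int) + 1 by omega]
  rw [show ((last:Int)+1)-1 = ((last:Nat):Int) by ring]
  simp only [PySem.List.pyGetD_natCast, PySem.List.pySetD_natCast]
  obtain ⟨l1, l2, l3, l4, hv, hp⟩ := fwdA tA tB ab ba nn last (by omega) _ rfl
  rw [(hv last le_rfl).1, (hv last le_rfl).2]
  rw [fwdB tA tB ab ba last]
  by_cases hc : (fDP tA tB ab ba last).1 ≤ (fDP tA tB ab ba last).2 <;>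
    [simp only [if_pos hc]; simp only [if_neg hc]]
  all_goals (
    first
      | (rw [show ("A":String) = Lfrom tA tB ab ba last "A" (last - last) from by
            rw [show last - last = 0 by omega]; rfl]
         obtain ⟨len2, hfin⟩ := bwdA tA tB ab ba nn last hnlast "A" _ _
           (fun j hj => (hp j hj).1) (fun j hj => (hp j hj).2) last le_rfl
           ((List.replicate nn "").set last (Lfrom tA tB ab ba last "A" (last - last)))
           (by simp)
           (by
             intro j hj1 hj2
             have hj : j = last := by omega
             subst hj
             rw [getD_set_self _ _ _ _ (by simp; omega)])
         rw [list_eq_map_range _ nn "" (fun j => Lfrom tA tB ab ba last "A" (last - j)) len2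
           (fun j hj => hfin j (by omega))]
         rw [(fTraj_eq tA tB ab ba last).1, hnlast])
      | (rw [show ("B":String) = Lfrom tA tB ab ba last "B" (last - last) from by
            rw [show last - last = 0 by omega]; rfl]
         obtain ⟨len2, hfin⟩ := bwdA tA tB ab ba nn last hnlast "B" _ _
           (fun j hj => (hp j hj).1) (fun j hj => (hp j hj).2) last le_rfl
           ((List.replicate nn "").set last (Lfrom tA tB ab ba last "B" (last - last)))
           (by simp)
           (by
             intro j hj1 hj2
             have hj : j = last := by omega
             subst hj
             rw [getD_set_self _ _ _ _ (by simp; omega)])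
         rw [list_eq_map_range _ nn "" (fun j => Lfrom tA tB ab ba last "B" (last - j)) len2
           (fun j hj => hfin j (by omega))]
         rw [(fTraj_eq tA tB ab ba last).2, hnlast]))
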